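-- pv_equiv track=rewrite | github.com/Nalla-Turing/Cryptonite_taskphase2_Mrinal | Cryptography/Second.py | isis
-- ===== SOURCE A (Python) =====
-- def isis(parrot, dolphin):
--     giraffe = ""
--     key_length = len(dolphin)
--     for i, kangaroo in enumerate(parrot):
--         zebra = dolphin[i % key_length]
--         cheetah = chr(ord(kangaroo) ^ ord(zebra))
--         giraffe += cheetah
--     return giraffe[::-1]
-- ===== SOURCE B (Python) =====
-- def isis(parrot, dolphin):
--     key_length = len(dolphin)
--     pieces = []
--     for i in range(len(parrot) - 1, -1, -1):
--         pieces.append(chr(ord(parrot[i]) ^ ord(dolphin[i % key_length])))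
--     return "".join(pieces)
-- ===== Notes on version B (the rewrite author's own statement) =====
-- stated objective: alternative
-- what changed: B builds the reversed output directly by iterating indices from len(parrot)-1 down to 0 into a list joined once, instead of A's forward enumerate with string concatenation followed by a [::-1] slice.
-- outside the precondition, e.g. on isis('x', ''): A raises ZeroDivisionError, B raises ZeroDivisionError
import Mathlib
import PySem

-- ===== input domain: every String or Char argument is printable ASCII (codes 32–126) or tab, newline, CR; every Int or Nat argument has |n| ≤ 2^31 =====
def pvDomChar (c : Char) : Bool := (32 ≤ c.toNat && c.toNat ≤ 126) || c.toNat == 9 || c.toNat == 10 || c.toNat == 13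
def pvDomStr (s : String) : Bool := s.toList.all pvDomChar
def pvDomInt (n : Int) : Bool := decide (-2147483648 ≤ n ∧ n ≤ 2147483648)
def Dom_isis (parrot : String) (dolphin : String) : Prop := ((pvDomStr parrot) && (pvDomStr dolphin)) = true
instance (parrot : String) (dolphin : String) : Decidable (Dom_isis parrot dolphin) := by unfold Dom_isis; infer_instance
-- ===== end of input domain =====

-- B builds the reversed output directly by a countdown-index loop into a list joined once,
-- instead of A's forward enumerate with string concatenation followed by a [::-1] slice.

-- ===== PORT A =====
def isis (parrot : String) (dolphin : String) : String :=
  let keyLength : Int := (dolphin.toList.length : Int)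
  let giraffe : List Char :=
    (PySem.List.enumerate parrot.toList 0).foldl
      (fun g ik =>
        let zebra := PySem.List.pyGetD dolphin.toList (PySem.Int.mod ik.1 keyLength) ' '
        let cheetah := Char.ofNat (Nat.xor ik.2.toNat zebra.toNat)
        g ++ [cheetah]) []
  String.ofList ((PySem.List.slice? giraffe none none (-1)).getD [])

-- ===== PORT B =====
def isis_alt (parrot : String) (dolphin : String) : String :=
  let keyLength : Int := (dolphin.toList.length : Int)
  let n : Int := (parrot.toList.length : Int)
  let pieces : List Char :=
    (PySem.List.pyRange (n - 1) (-1) (-1)).foldl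
      (fun acc i =>
        acc ++ [Char.ofNat (Nat.xor (PySem.List.pyGetD parrot.toList i ' ').toNat
                                    (PySem.List.pyGetD dolphin.toList (PySem.Int.mod i keyLength) ' ').toNat)]) []
  String.ofList pieces

-- ===== PRECONDITION & SPEC =====
-- Pre_ excludes exactly the inputs where Python A raises ZeroDivisionError (i % 0): non-empty text with empty key.
def Pre_isis (parrot : String) (dolphin : String) : Prop :=
  parrot.toList = [] ∨ dolphin.toList ≠ []
instance (parrot : String) (dolphin : String) : Decidable (Pre_isis parrot dolphin) := by unfold Pre_isis; infer_instance
def pvWitness_isis : String × String := ("hello", "ab")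

def Spec_isis (parrot : String) (dolphin : String) (out : String) : Prop := out = isis_alt parrot dolphin
instance (parrot : String) (dolphin : String) (out : String) : Decidable (Spec_isis parrot dolphin out) := by unfold Spec_isis; infer_instance

-- ===== CLAIM (what is proved, stated in full; the proofs are below) =====
def Claim_equal_isis : Prop := ∀ (parrot : String) (dolphin : String), Dom_isis parrot dolphin → Pre_isis parrot dolphin → Spec_isis parrot dolphin (isis parrot dolphin)

-- ===== LEMMAS AND PROOFS =====

theorem isis_eq_alt (parrot dolphin : String) : isis parrot dolphin = isis_alt parrot dolphin := by
  unfold isis isis_alt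
  simp only [PySem.List.slice?_none_none_neg_one, Option.getD_some]
  rw [PySem.List.foldl_append_singleton_eq_map, PySem.List.foldl_append_singleton_eq_map,
      PySem.List.enumerate_eq_map_pyRange parrot.toList ' ', List.map_map]
  have hrev : PySem.List.pyRange ((parrot.toList.length : Int) - 1) (-1) (-1)
      = (PySem.List.pyRange 0 (parrot.toList.length : Int) 1).reverse := by
    have := PySem.List.pyRange_neg_one_eq_reverse ((parrot.toList.length : Int) - 1) (-1)
    simpa using this
  rw [hrev, List.map_reverse]
  rfl

-- ===== VERDICT (by name: the statement is the Claim_ definition above) =====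
theorem isis_spec : Claim_equal_isis := by
  intro parrot dolphin _ _
  exact isis_eq_alt parrot dolphin
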